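-- pv_equiv track=rewrite | github.com/plepe/pgmapcss | pgmapcss/compiler/compile_build_result.py | get_default_other
-- ===== SOURCE A (Python) =====
-- def get_default_other(prop, stat):
--     ret = "(current['properties'][pseudo_element][" + repr(prop) + "] if " + repr(prop) + " in current['properties'][pseudo_element] else "
--
--     if 'default_other' in stat['defines'] and prop in stat['defines']['default_other']:
--         ret += get_default_other(stat['defines']['default_other'][prop]['value'], stat)
--
--     elif 'default_value' in stat['defines'] and prop in stat['defines']['default_value']:
--         ret += repr(stat['defines']['default_value'][prop]['value'])
--
--     else:
--         ret += "None"
--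
--     ret += ")"
--
--     return ret
-- ===== SOURCE B (Python) =====
-- def get_default_other(prop, stat):
--     defines = stat['defines']
--     d_other = defines.get('default_other', {})
--     d_value = defines.get('default_value', {})
--     parts = []
--     n = 0
--     while True:
--         parts.append("(current['properties'][pseudo_element][" + repr(prop) +
--                      "] if " + repr(prop) + " in current['properties'][pseudo_element] else ")
--         n += 1
--         if prop in d_other:
--             prop = d_other[prop]['value']
--         else:
--             if prop in d_value:
--                 parts.append(repr(d_value[prop]['value']))
--             else:
--                 parts.append("None")
--             break
--     return ''.join(parts) + ')' * n
-- ===== Notes on version B (the rewrite author's own statement) =====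
-- stated objective: alternative
-- what changed: Replaces A's recursion (each level re-concatenating its suffix) by a single iterative walk of the default_other chain that collects prefix parts in a list, joins them once and appends one ')' per level; Pre_ excludes only inputs where A raises (missing 'defines'/'value' keys) or recurses forever (a cyclic default_other chain).
import Mathlib
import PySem

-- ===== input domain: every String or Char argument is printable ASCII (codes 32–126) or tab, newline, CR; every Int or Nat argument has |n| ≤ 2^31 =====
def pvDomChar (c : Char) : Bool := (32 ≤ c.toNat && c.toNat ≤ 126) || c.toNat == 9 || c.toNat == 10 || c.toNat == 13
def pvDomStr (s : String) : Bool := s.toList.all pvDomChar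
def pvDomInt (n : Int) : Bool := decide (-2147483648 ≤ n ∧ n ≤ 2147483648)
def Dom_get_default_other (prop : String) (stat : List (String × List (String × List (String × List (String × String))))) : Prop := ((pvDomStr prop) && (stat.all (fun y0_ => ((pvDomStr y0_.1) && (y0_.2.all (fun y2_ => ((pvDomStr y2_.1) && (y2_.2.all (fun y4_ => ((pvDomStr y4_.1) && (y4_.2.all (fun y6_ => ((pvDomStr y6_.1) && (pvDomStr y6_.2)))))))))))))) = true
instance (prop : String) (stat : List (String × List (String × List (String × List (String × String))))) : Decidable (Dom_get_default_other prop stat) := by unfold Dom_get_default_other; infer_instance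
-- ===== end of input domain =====

-- B replaces A's recursion by an iterative chain walk collecting parts, joined once; equal return value on Pre_ (A's non-raising, non-diverging inputs).

-- Python's repr() of a string; exact for strings over Dom's character set (printable ASCII plus tab/newline/CR).
def pyReprStr (s : String) : String :=
  let cs := s.toList
  let q : Char := if cs.contains '\'' && !cs.contains '"' then '"' else '\''
  let esc : Char → List Char := fun c =>
    if c = '\\' then ['\\', '\\']
    else if c = q then ['\\', q]
    else if c = '\n' then ['\\', 'n']
    else if c = '\r' then ['\\', 'r']
    else if c = '\t' then ['\\', 't']
    else [c]
  String.ofList (q :: cs.flatMap esc ++ [q])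

-- The fixed prefix both Pythons build for one level.
def gdoPrefix (prop : String) : String :=
  "(current['properties'][pseudo_element][" ++ pyReprStr prop ++ "] if " ++ pyReprStr prop
    ++ " in current['properties'][pseudo_element] else "

-- ===== PORT A =====
-- A's elif/else part: repr(stat['defines']['default_value'][prop]['value']) or "None".
-- (lookup returning none where Python raises KeyError yields "" — those inputs are outside Pre_.)
def gdoFallbackA (defines : List (String × List (String × List (String × String)))) (prop : String) : String :=
  match List.lookup "default_value" defines with
  | some dValue =>
    match List.lookup prop dValue with
    | some entry =>
      match List.lookup "value" entry with
      | some v => pyReprStr v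
      | none => ""   -- Python: KeyError, outside Pre_
    | none => "None"
  | none => "None"

-- A's recursion, made total with fuel; Pre_ guarantees the fuel (|default_other| + 1) is never exhausted.
def gdoRecA (defines : List (String × List (String × List (String × String)))) : Nat → String → String
  | 0, _ => ""   -- unreachable under Pre_
  | n + 1, prop =>
    gdoPrefix prop ++
      (match List.lookup "default_other" defines with
       | some dOther =>
         match List.lookup prop dOther with
         | some entry =>
           match List.lookup "value" entry with
           | some v => gdoRecA defines n v
           | none => ""   -- Python: KeyError, outside Pre_
         | none => gdoFallbackA defines prop
       | none => gdoFallbackA defines prop) ++ ")"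

def get_default_other (prop : String) (stat : List (String × List (String × List (String × List (String × String))))) : String :=
  match List.lookup "defines" stat with
  | some defines => gdoRecA defines (((List.lookup "default_other" defines).getD []).length + 1) prop
  | none => ""   -- Python: KeyError, outside Pre_

-- ===== PORT B =====
-- ')' * n
def parens : Nat → String
  | 0 => ""
  | n + 1 => ")" ++ parens n

-- B's while-loop: accumulate the joined parts in acc, count levels in n; fuel made total as in A.
def gdoLoopB (dOther dValue : List (String × List (String × String))) :
    Nat → String → String → Nat → String
  | 0, _, acc, n => acc ++ parens n   -- unreachable under Pre_
  | f + 1, prop, acc, n =>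
    let acc' := acc ++ gdoPrefix prop
    match List.lookup prop dOther with
    | some entry => gdoLoopB dOther dValue f ((List.lookup "value" entry).getD "") acc' (n + 1)
    | none =>
      let tail :=
        match List.lookup prop dValue with
        | some entry =>
          match List.lookup "value" entry with
          | some v => pyReprStr v
          | none => ""   -- Python: KeyError, outside Pre_
        | none => "None"
      acc' ++ tail ++ parens (n + 1)

def get_default_other_alt (prop : String) (stat : List (String × List (String × List (String × List (String × String))))) : String :=
  match List.lookup "defines" stat with
  | some defines =>
    let dOther := (List.lookup "default_other" defines).getD []
    let dValue := (List.lookup "default_value" defines).getD []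
    gdoLoopB dOther dValue (dOther.length + 1) prop "" 0
  | none => ""   -- Python: KeyError, outside Pre_

-- ===== PRECONDITION & SPEC =====
-- The default_other chain from prop terminates (visits no key twice) and never hits a missing
-- 'value' key: rem is the multiset of still-allowed chain keys, f its length, both shrinking each step.
def chainOk (dOther dValue : List (String × List (String × String))) :
    Nat → List String → String → Bool
  | f, rem, prop =>
    match List.lookup prop dOther with
    | none =>
      match List.lookup prop dValue with
      | some entry => (List.lookup "value" entry).isSome
      | none => true
    | some entry =>
      match f with
      | 0 => false
      | f' + 1 =>
        decide (prop ∈ rem) && (List.lookup "value" entry).isSome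
          && chainOk dOther dValue f' (rem.erase prop) ((List.lookup "value" entry).getD "")

-- Pre_ excludes exactly the inputs on which Python A raises (KeyError on 'defines' or a missing
-- 'value' key) or never returns (a cyclic default_other chain → RecursionError).
def Pre_get_default_other (prop : String) (stat : List (String × List (String × List (String × List (String × String))))) : Prop :=
  (match List.lookup "defines" stat with
   | some defines =>
     chainOk ((List.lookup "default_other" defines).getD [])
             ((List.lookup "default_value" defines).getD [])
             ((List.lookup "default_other" defines).getD []).length
             (((List.lookup "default_other" defines).getD []).map Prod.fst) prop
   | none => false) = true

instance (prop : String) (stat : List (String × List (String × List (String × List (String × String))))) : Decidable (Pre_get_default_other prop stat) := by unfold Pre_get_default_other; infer_instance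

def pvWitness_get_default_other : String × (List (String × List (String × List (String × List (String × String))))) :=
  ("a", [("defines", [("default_other", [("a", [("value", "b")])]), ("default_value", [("b", [("value", "x")])])])])

def Spec_get_default_other (prop : String) (stat : List (String × List (String × List (String × List (String × String))))) (out : String) : Prop := out = get_default_other_alt prop stat
instance (prop : String) (stat : List (String × List (String × List (String × List (String × String))))) (out : String) : Decidable (Spec_get_default_other prop stat out) := by unfold Spec_get_default_other; infer_instance

-- ===== CLAIM (what is proved, stated in full; the proofs are below) =====
def Claim_equal_get_default_other : Prop := ∀ (prop : String) (stat : List (String × List (String × List (String × List (String × String))))), Dom_get_default_other prop stat → Pre_get_default_other prop stat → Spec_get_default_other prop stat (get_default_other prop stat)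

-- ===== LEMMAS AND PROOFS =====

lemma parens_succ (n : Nat) : parens (n + 1) = ")" ++ parens n := rfl

-- B's fallback tail equals A's fallback, once dValue is defines' default_value table (or []).
lemma fallback_eq (defines : List (String × List (String × List (String × String)))) (prop : String) :
    (match List.lookup prop ((List.lookup "default_value" defines).getD []) with
     | some entry =>
       match List.lookup "value" entry with
       | some v => pyReprStr v
       | none => ""
     | none => "None") = gdoFallbackA defines prop := by
  unfold gdoFallbackA
  cases List.lookup "default_value" defines <;> simp

-- Loop invariant: one B-loop run equals acc ++ A's recursion ++ n closing parens.
lemma loop_eq (defines : List (String × List (String × List (String × String)))) :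
    ∀ (fuel cf : Nat) (rem : List String) (prop acc : String) (n : Nat),
      chainOk ((List.lookup "default_other" defines).getD [])
              ((List.lookup "default_value" defines).getD []) cf rem prop = true →
      rem.length < fuel →
      gdoLoopB ((List.lookup "default_other" defines).getD [])
               ((List.lookup "default_value" defines).getD []) fuel prop acc n
        = acc ++ gdoRecA defines fuel prop ++ parens n := by
  intro fuel
  induction fuel with
  | zero => intro cf rem prop acc n _ h; omega
  | succ f ih =>
    intro cf rem prop acc n hok hlen
    rw [gdoLoopB, gdoRecA]
    cases hod : List.lookup "default_other" defines with
    | none =>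
      simp only [hod, Option.getD_none] at hok ⊢
      rw [chainOk] at hok
      simp only [List.lookup_nil] at hok ⊢
      rw [fallback_eq defines prop, parens_succ]
      simp [String.append_assoc]
    | some dOther =>
      simp only [hod, Option.getD_some] at hok ih ⊢
      cases hlp : List.lookup prop dOther with
      | none =>
        rw [chainOk] at hok
        simp only [hlp] at hok ⊢
        rw [fallback_eq defines prop, parens_succ]
        simp [String.append_assoc]
      | some entry =>
        rw [chainOk] at hok
        simp only [hlp] at hok
        cases cf with
        | zero => simp at hok
        | succ c =>
          simp only [Bool.and_eq_true, decide_eq_true_eq] at hok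
          obtain ⟨⟨hmem, hsome⟩, hrec⟩ := hok
          cases hv : List.lookup "value" entry with
          | none => exact absurd hsome (by simp [hv])
          | some v =>
            rw [hv] at hrec
            simp only [hv, Option.getD_some]
            have hlen' : (rem.erase prop).length < f := by
              have h1 : (rem.erase prop).length = rem.length - 1 := List.length_erase_of_mem hmem
              have h2 : 0 < rem.length := List.length_pos_of_mem hmem
              omega
            rw [ih c (rem.erase prop) v (acc ++ gdoPrefix prop) (n + 1)
                  (by simpa [hod] using hrec) hlen']
            rw [parens_succ]
            simp [String.append_assoc]

-- ===== VERDICT (by name: the statement is the Claim_ definition above) =====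
theorem get_default_other_spec : Claim_equal_get_default_other := by
  intro prop stat _ hpre
  unfold Spec_get_default_other get_default_other get_default_other_alt
  unfold Pre_get_default_other at hpre
  cases hd : List.lookup "defines" stat with
  | none => exact absurd (hd ▸ hpre) (by simp)
  | some defines =>
    rw [hd] at hpre
    dsimp only
    dsimp only at hpre
    have hlen : (((List.lookup "default_other" defines).getD []).map Prod.fst).length
        < ((List.lookup "default_other" defines).getD []).length + 1 := by
      simp
    rw [loop_eq defines (((List.lookup "default_other" defines).getD []).length + 1)
          ((List.lookup "default_other" defines).getD []).length
          (((List.lookup "default_other" defines).getD []).map Prod.fst) prop "" 0 hpre hlen]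
    simp [parens]
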